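-- pv_equiv track=rewrite | github.com/kwyxz/steamdeck | scripts/make_m3u.py | group_by_game
-- ===== SOURCE A (Python) =====
-- def find_separator(game):
--     for separator in [' (Disc ', ' (Disk ']:
--         if separator in game:
--             return separator
--
-- def group_by_game(gamelist):
--     game_hash = {}
--     for game in gamelist:
--         separator = find_separator(game)
--         game_name = game.split(separator)[0]
--         try:
--             game_hash[game_name]
--         except KeyError:
--             game_hash[game_name] = [game]
--         else:
--             game_hash[game_name].append(game)
--     return game_hash
-- ===== SOURCE B (Python) =====
-- def find_separator(game):
--     for separator in [' (Disc ', ' (Disk ']: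
--         if separator in game:
--             return separator
--
-- def group_by_game(gamelist):
--     names = [game.split(find_separator(game))[0] for game in gamelist]
--     keys = []
--     for name in names:
--         if name not in keys:
--             keys.append(name)
--     return {key: [game for game, name in zip(gamelist, names) if name == key]
--             for key in keys}
-- ===== Notes on version B (the rewrite author's own statement) =====
-- stated objective: alternative
-- what changed: Replaces A's single-pass try/except dict accumulation by a gather-per-key strategy: compute all base names once, collect the distinct keys in first-occurrence order, then build each group by filtering the whole list for that key (no incremental dict updates at all); Pre_ excludes lists containing an empty or whitespace-only name without a disc separator, where A raises IndexError.
-- outside the precondition, e.g. on group_by_game(['  ']): A raises IndexError, B raises IndexError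
import Mathlib
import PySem

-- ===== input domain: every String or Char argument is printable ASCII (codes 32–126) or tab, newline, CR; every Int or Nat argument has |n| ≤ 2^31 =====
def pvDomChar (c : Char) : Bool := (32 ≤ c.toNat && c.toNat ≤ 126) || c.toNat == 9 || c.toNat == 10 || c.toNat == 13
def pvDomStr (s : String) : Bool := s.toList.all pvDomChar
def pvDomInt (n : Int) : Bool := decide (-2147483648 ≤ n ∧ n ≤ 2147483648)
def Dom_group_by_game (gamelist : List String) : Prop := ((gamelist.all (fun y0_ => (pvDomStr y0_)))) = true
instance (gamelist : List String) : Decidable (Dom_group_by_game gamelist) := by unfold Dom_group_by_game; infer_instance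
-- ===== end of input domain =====

-- B replaces A's single-pass try/except dict accumulation by a gather-per-key strategy:
-- compute all base names, collect the distinct keys in first-occurrence order, then build
-- each group by filtering the whole list for that key; alternative decomposition, not faster.

-- ===== PORT A =====
def find_separator (game : String) : Option String :=
  if PySem.Str.isIn " (Disc " game then some " (Disc "
  else if PySem.Str.isIn " (Disk " game then some " (Disk "
  else none

def group_by_game (gamelist : List String) : List (String × List String) :=
  (gamelist.foldl (fun game_hash game =>
      let separator := find_separator game
      let game_name := (match separator with
        | some sep => (PySem.Str.split? game sep).getD []   -- sep is a nonempty literal, split? = some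
        | none => PySem.Str.split₀ game).headD ""           -- [0]; nonempty under Pre_
      match game_hash.get? game_name with
      | none => game_hash.insert game_name [game]
      | some v => game_hash.insert game_name (v ++ [game])) PySem.Dict.empty).items

-- ===== PORT B =====
def group_by_game_alt (gamelist : List String) : List (String × List String) :=
  -- names = [game.split(find_separator(game))[0] for game in gamelist]
  let names := gamelist.map (fun game =>
    (match find_separator game with
     | some sep => (PySem.Str.split? game sep).getD []
     | none => PySem.Str.split₀ game).headD "")             -- [0]; nonempty under Pre_
  -- keys: distinct names in first-occurrence order
  let keys := names.foldl (fun ks name => if ks.contains name then ks else ks ++ [name]) ([] : List String)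
  -- {key: [game for game, name in zip(gamelist, names) if name == key] for key in keys}
  keys.map (fun key => (key,
    ((gamelist.zip names).filter (fun p => p.2 == key)).map (fun p => p.1)))

-- ===== PRECONDITION & SPEC =====
-- Pre_ excludes lists containing an empty or whitespace-only string without a disc
-- separator: there `game.split(None)[0]` raises IndexError in A (and in B alike).
def Pre_group_by_game (gamelist : List String) : Prop :=
  ∀ g ∈ gamelist,
    PySem.Str.isIn " (Disc " g = true ∨ PySem.Str.isIn " (Disk " g = true ∨
      PySem.Str.split₀ g ≠ []
instance (gamelist : List String) : Decidable (Pre_group_by_game gamelist) := by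
  unfold Pre_group_by_game; infer_instance

def pvWitness_group_by_game : List String :=
  ["Game (Disc 1)", "Game (Disc 2)", "Other 1"]

def Spec_group_by_game (gamelist : List String) (out : List (String × List String)) : Prop := out = group_by_game_alt gamelist
instance (gamelist : List String) (out : List (String × List String)) : Decidable (Spec_group_by_game gamelist out) := by unfold Spec_group_by_game; infer_instance

-- ===== CLAIM (what is proved, stated in full; the proofs are below) =====
def Claim_equal_group_by_game : Prop := ∀ (gamelist : List String), Dom_group_by_game gamelist → Pre_group_by_game gamelist → Spec_group_by_game gamelist (group_by_game gamelist)

-- ===== LEMMAS AND PROOFS =====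

-- the base-name expression both ports compute, named for the proofs
def pvBase (game : String) : String :=
  (match find_separator game with
   | some sep => (PySem.Str.split? game sep).getD []
   | none => PySem.Str.split₀ game).headD ""

-- A's loop body is a `modify` with append.
theorem step_eq (d : PySem.Dict String (List String)) (k : String) (g : String) :
    (match d.get? k with
     | none => d.insert k [g]
     | some v => d.insert k (v ++ [g])) = d.modify k [] (fun v => v ++ [g]) := by
  cases h : d.get? k with
  | none => simp [PySem.Dict.modify, PySem.Dict.getD_eq_get?_getD, h]
  | some v => simp [PySem.Dict.modify, PySem.Dict.getD_eq_get?_getD, h]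

-- B's result, written with the proof-side names (keys loop IS ordered dedup, definitionally)
theorem alt_eq (gamelist : List String) :
    group_by_game_alt gamelist
      = (PySem.List.dedup (gamelist.map pvBase)).map (fun k => (k,
          ((gamelist.zip (gamelist.map pvBase)).filter (fun p => p.2 == k)).map (fun p => p.1))) := by
  rfl

-- both filter shapes pick the games whose base name is k, in list order
theorem filters_eq (k : String) (l : List String) :
    (((l.map (fun g => (pvBase g, g))).filter (fun p => p.1 == k)).map (fun p => p.2))
      = (((l.zip (l.map pvBase)).filter (fun p => p.2 == k)).map (fun p => p.1)) := by
  induction l with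
  | nil => rfl
  | cons a t ih =>
    by_cases h : pvBase a = k <;> simp [h, ih]

-- ===== VERDICT (by name: the statement is the Claim_ definition above) =====
theorem group_by_game_spec : Claim_equal_group_by_game := by
  intro gamelist _ _
  unfold Spec_group_by_game group_by_game
  rw [alt_eq]
  have hstep :
      (fun (game_hash : PySem.Dict String (List String)) (game : String) =>
        let separator := find_separator game
        let game_name := (match separator with
          | some sep => (PySem.Str.split? game sep).getD []
          | none => PySem.Str.split₀ game).headD ""
        match game_hash.get? game_name with
        | none => game_hash.insert game_name [game]
        | some v => game_hash.insert game_name (v ++ [game]))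
      = (fun (d : PySem.Dict String (List String)) (g : String) =>
          d.modify (pvBase g) [] (fun v => v ++ [g])) := by
    funext d g
    simp only []
    rw [step_eq]
    rfl
  rw [hstep]
  set names := gamelist.map pvBase with hnames
  -- A's fold over games is a fold over (base, game) pairs
  have hA : gamelist.foldl (fun d g => d.modify (pvBase g) [] (fun v => v ++ [g])) PySem.Dict.empty
      = (gamelist.map (fun g => (pvBase g, g))).foldl
          (fun d p => d.modify p.1 [] (fun v => v ++ [p.2])) PySem.Dict.empty := by
    rw [List.foldl_map]
  rw [hA]
  set pairsA := gamelist.map (fun g => (pvBase g, g)) with hpairsA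
  have hfstA : pairsA.map (fun p => p.1) = names := by
    simp [hpairsA, hnames, List.map_map, Function.comp_def]
  have hndA : ((pairsA.foldl (fun d p => d.modify p.1 [] (fun v => v ++ [p.2])) PySem.Dict.empty)).keys.Nodup :=
    PySem.Dict.nodup_keys_foldl_modify_key pairsA (fun p => p.1) [] _ _ PySem.Dict.nodup_keys_empty
  rw [PySem.Dict.items_eq_map_keys _ hndA []]
  have hkA : ((pairsA.foldl (fun d p => d.modify p.1 [] (fun v => v ++ [p.2])) PySem.Dict.empty)).keys
      = PySem.List.dedup names := by
    rw [PySem.Dict.keys_foldl_modify_key, hfstA]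
    simp [PySem.Set.update_nil_left]
  rw [hkA]
  apply List.map_congr_left
  intro k _
  congr 1
  rw [PySem.Dict.getD_foldl_modify_append]
  simp only [PySem.Dict.getD_empty, List.nil_append]
  rw [hpairsA, hnames]
  exact filters_eq k gamelist
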